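-- pv_equiv track=rewrite | github.com/Gobans/codetree-TILs | 240109/함수를 이용한 369 게임/369-games-using-functions.py | is_magic_number
-- ===== SOURCE A (Python) =====
-- def is_magic_number(n):
--     strN = str(n)
--     for digit in ['3', '6', '9']:
--         if digit in strN:
--             return True
--     if n%3 == 0:
--         return True
--     return False
-- ===== SOURCE B (Python) =====
-- def is_magic_number(n):
--     m = abs(n)
--     s = 0
--     flag = False
--     while m:
--         m, d = divmod(m, 10)
--         s += d
--         if d in (3, 6, 9):
--             flag = True
--     return flag or s % 3 == 0
-- ===== Notes on version B (the rewrite author's own statement) =====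
-- stated objective: alternative
-- what changed: Replaces A's string conversion and substring search for the magic digits plus a separate modulo test with a single arithmetic divmod loop over the digits of the absolute value, using the digit-sum divisibility rule; no string is built.
import Mathlib
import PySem

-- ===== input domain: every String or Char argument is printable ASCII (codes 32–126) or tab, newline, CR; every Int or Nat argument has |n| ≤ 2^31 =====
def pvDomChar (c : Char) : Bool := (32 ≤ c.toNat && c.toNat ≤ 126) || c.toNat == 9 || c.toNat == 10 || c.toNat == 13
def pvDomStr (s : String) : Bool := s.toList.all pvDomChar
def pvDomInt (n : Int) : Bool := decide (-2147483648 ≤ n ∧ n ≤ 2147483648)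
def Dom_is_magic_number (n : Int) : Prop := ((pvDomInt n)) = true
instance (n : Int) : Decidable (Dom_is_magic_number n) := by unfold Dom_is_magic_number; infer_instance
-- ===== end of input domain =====

-- B replaces A's string search and separate modulo test with one digit-extracting
-- arithmetic pass (digit-sum divisibility rule); objective: alternative decomposition.


-- ===== PORT A =====
-- the `for digit in ['3','6','9']: if digit in strN: return True` loop
def pvAScan (digits : List String) (strN : String) : Bool :=
  match digits with
  | [] => false
  | d :: rest => if PySem.Str.isIn d strN then true else pvAScan rest strN

def is_magic_number (n : Int) : Bool :=
  let strN := PySem.Int.toStr n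
  if pvAScan ["3", "6", "9"] strN then true
  else if PySem.Int.mod n 3 == 0 then true
  else false

-- ===== PORT B =====
-- the `while m: m, d = divmod(m, 10); s += d; if d in (3,6,9): flag = True` loop
def pvBLoop (m s : Nat) (flag : Bool) : Nat × Bool :=
  if m = 0 then (s, flag)
  else pvBLoop (m / 10) (s + m % 10)
        (if m % 10 = 3 ∨ m % 10 = 6 ∨ m % 10 = 9 then true else flag)
  decreasing_by exact Nat.div_lt_self (Nat.pos_of_ne_zero (by assumption)) (by norm_num)

def is_magic_number_alt (n : Int) : Bool :=
  let r := pvBLoop n.natAbs 0 false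
  r.2 || decide (r.1 % 3 = 0)

-- ===== PRECONDITION & SPEC =====
def Spec_is_magic_number (n : Int) (out : Bool) : Prop := out = is_magic_number_alt n
instance (n : Int) (out : Bool) : Decidable (Spec_is_magic_number n out) := by unfold Spec_is_magic_number; infer_instance

-- ===== CLAIM (what is proved, stated in full; the proofs are below) =====
def Claim_equal_is_magic_number : Prop := ∀ (n : Int), Dom_is_magic_number n → Spec_is_magic_number n (is_magic_number n)

-- ===== LEMMAS AND PROOFS =====

-- digit sum of m, as B's loop accumulates it
def pvDSum (m : Nat) : Nat :=
  if m = 0 then 0 else m % 10 + pvDSum (m / 10)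
  decreasing_by exact Nat.div_lt_self (Nat.pos_of_ne_zero (by assumption)) (by norm_num)

-- "some decimal digit of m is 3, 6 or 9", as B's flag records it
def pvDFlag (m : Nat) : Bool :=
  if m = 0 then false
  else (decide (m % 10 = 3) || decide (m % 10 = 6) || decide (m % 10 = 9)) || pvDFlag (m / 10)
  decreasing_by exact Nat.div_lt_self (Nat.pos_of_ne_zero (by assumption)) (by norm_num)

lemma pvBLoop_eq (m : Nat) : ∀ s f, pvBLoop m s f = (s + pvDSum m, f || pvDFlag m) := by
  induction m using Nat.strong_induction_on with
  | _ m ih =>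
    intro s f
    rw [pvBLoop, pvDSum, pvDFlag]
    by_cases h : m = 0
    · simp [h]
    · have hlt : m / 10 < m := Nat.div_lt_self (Nat.pos_of_ne_zero h) (by norm_num)
      simp only [h, if_false]
      rw [ih _ hlt]
      rw [Prod.mk.injEq]
      refine ⟨by omega, ?_⟩
      by_cases h3 : m % 10 = 3 ∨ m % 10 = 6 ∨ m % 10 = 9 <;> cases f <;> simp_all; tauto

lemma pvDSum_mod3 (m : Nat) : pvDSum m % 3 = m % 3 := by
  induction m using Nat.strong_induction_on with
  | _ m ih =>
    rw [pvDSum]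
    by_cases h : m = 0
    · simp [h]
    · have hlt : m / 10 < m := Nat.div_lt_self (Nat.pos_of_ne_zero h) (by norm_num)
      have := ih _ hlt
      simp only [h, if_false]
      omega

lemma digitChar_369 (d : Nat) (h : d < 10) :
    ('3' = Nat.digitChar d ↔ d = 3) ∧ ('6' = Nat.digitChar d ↔ d = 6) ∧
    ('9' = Nat.digitChar d ↔ d = 9) := by
  interval_cases d <;> exact ⟨by decide, by decide, by decide⟩

lemma core_flag : ∀ fuel m acc, 0 < fuel → m < 10 ^ fuel →
    (('3' ∈ Nat.toDigitsCore 10 fuel m acc ∨ '6' ∈ Nat.toDigitsCore 10 fuel m acc ∨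
      '9' ∈ Nat.toDigitsCore 10 fuel m acc) ↔
     (pvDFlag m = true ∨ ('3' ∈ acc ∨ '6' ∈ acc ∨ '9' ∈ acc))) := by
  intro fuel
  induction fuel with
  | zero => intro m acc h; omega
  | succ f ih =>
    intro m acc _ hm
    obtain ⟨hd3, hd6, hd9⟩ := digitChar_369 (m % 10) (Nat.mod_lt _ (by norm_num))
    rw [Nat.toDigitsCore]
    by_cases h0 : m / 10 = 0
    · simp only [h0, if_pos, List.mem_cons]
      rw [hd3, hd6, hd9, pvDFlag]
      by_cases hz : m = 0
      · simp only [hz, if_pos]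
        have : (0 : Nat) % 10 = 0 := by norm_num
        simp only [hz] at *
        constructor
        · rintro (h | h | h) <;> exact Or.inr (by tauto)
        · rintro (h | h) <;> tauto
      · have hf0 : pvDFlag (m / 10) = false := by rw [h0, pvDFlag]; simp
        simp only [hz, if_false, hf0, Bool.or_false, Bool.or_eq_true, decide_eq_true_eq]
        tauto
    · simp only [h0, if_false]
      have hm' : m / 10 < 10 ^ f := by
        have : m < 10 ^ f * 10 := by
          calc m < 10 ^ (f + 1) := hm
          _ = 10 ^ f * 10 := by ring
        omega
      have hf : 0 < f := by
        by_contra hc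
        have : f = 0 := by omega
        subst this
        simp at hm'
        omega
      have hz : m ≠ 0 := by omega
      conv_rhs => rw [pvDFlag]
      rw [ih (m / 10) _ hf hm']
      simp only [hz, if_false, List.mem_cons, Bool.or_eq_true, decide_eq_true_eq]
      rw [hd3, hd6, hd9]
      clear ih hm hm' h0 hf hz hd3 hd6 hd9
      rcases Bool.eq_false_or_eq_true (pvDFlag (m / 10)) with hP | hP <;>
        simp only [hP, Bool.false_eq_true] <;>
          tauto

lemma flag_toDigits (m : Nat) :
    ('3' ∈ Nat.toDigits 10 m ∨ '6' ∈ Nat.toDigits 10 m ∨ '9' ∈ Nat.toDigits 10 m) ↔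
    pvDFlag m = true := by
  have h := core_flag (m + 1) m [] (by omega)
    (lt_of_lt_of_le (Nat.lt_pow_self (by norm_num))
      (Nat.pow_le_pow_right (by norm_num) (by omega)))
  rw [Nat.toDigits] at *
  simpa using h

lemma mem_toChars (c : Char) (hc : c = '3' ∨ c = '6' ∨ c = '9') (n : Int) :
    (c ∈ PySem.Int.toChars n ↔ c ∈ Nat.toDigits 10 n.natAbs) := by
  rw [PySem.Int.toChars]
  by_cases h : n < 0
  · simp only [h, if_pos, List.mem_cons]
    constructor
    · rintro (h' | h')
      · subst h'; rcases hc with h | h | h <;> simp_all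
      · exact h'
    · exact Or.inr
  · simp only [h, if_false]
    have : n.toNat = n.natAbs := by omega
    rw [this]

lemma isIn_single (c : Char) (sub s : String) (h : sub.toList = [c]) :
    PySem.Str.isIn sub s = true ↔ c ∈ s.toList := by
  rw [PySem.Str.isIn_iff_infix, h]
  exact List.singleton_infix_iff c s.toList

lemma aScan_unfold (s : String) :
    pvAScan ["3", "6", "9"] s = true ↔
      (PySem.Str.isIn "3" s = true ∨ PySem.Str.isIn "6" s = true ∨
       PySem.Str.isIn "9" s = true) := by
  simp only [pvAScan]
  by_cases a3 : PySem.Str.isIn "3" s = true <;>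
    by_cases a6 : PySem.Str.isIn "6" s = true <;>
      by_cases a9 : PySem.Str.isIn "9" s = true <;>
        simp only [a3, a6, a9, if_true] <;> tauto

lemma aScan_chars (n : Int) :
    pvAScan ["3", "6", "9"] (PySem.Int.toStr n) = true ↔ pvDFlag n.natAbs = true := by
  rw [aScan_unfold]
  rw [isIn_single '3' "3" _ (by decide), isIn_single '6' "6" _ (by decide),
      isIn_single '9' "9" _ (by decide)]
  rw [PySem.Int.toList_toStr]
  rw [mem_toChars '3' (by tauto) n, mem_toChars '6' (by tauto) n,
      mem_toChars '9' (by tauto) n]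
  exact flag_toDigits n.natAbs

lemma mod3_iff (n : Int) : PySem.Int.mod n 3 = 0 ↔ n.natAbs % 3 = 0 := by
  rw [PySem.Int.mod_eq_zero_iff_dvd]
  omega

-- ===== VERDICT (by name: the statement is the Claim_ definition above) =====
theorem is_magic_number_spec : Claim_equal_is_magic_number := by
  intro n _
  unfold Spec_is_magic_number is_magic_number is_magic_number_alt
  rw [pvBLoop_eq]
  simp only [Nat.zero_add, Bool.false_or]
  have hiff : PySem.Int.mod n 3 = 0 ↔ pvDSum n.natAbs % 3 = 0 := by
    rw [mod3_iff, pvDSum_mod3]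
  cases hA : pvAScan ["3", "6", "9"] (PySem.Int.toStr n) with
  | true =>
    have hF : pvDFlag n.natAbs = true := (aScan_chars n).mp hA
    simp [hF]
  | false =>
    have hF : pvDFlag n.natAbs = false := by
      rcases Bool.eq_false_or_eq_true (pvDFlag n.natAbs) with h | h
      · rw [(aScan_chars n).mpr h] at hA; exact absurd hA (by simp)
      · exact h
    rw [hF]
    simp only [Bool.false_eq_true, if_false, Bool.false_or]
    by_cases hd : PySem.Int.mod n 3 = 0
    · simp only [hd, beq_self_eq_true, if_true]
      simp [hiff.mp hd]
    · have hd' : ¬ pvDSum n.natAbs % 3 = 0 := fun h => hd (hiff.mpr h)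
      simp only [beq_iff_eq, hd, if_false]
      simp [hd']
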